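-- pv_equiv track=rewrite | github.com/WebKit/WebKit | Tools/Scripts/webkitpy/api_tests/runner.py | _shard_tests
-- ===== SOURCE A (Python) =====
-- def _shard_tests(tests):
--     shards = {}
--     for test in tests:
--         shard_prefix = '.'.join(test.split('.')[:-1])
--         if shard_prefix not in shards:
--             shards[shard_prefix] = []
--         shards[shard_prefix].append(test)
--     return shards
-- ===== SOURCE B (Python) =====
-- def _shard_tests(tests):
--     def prefix(test):
--         return '.'.join(test.split('.')[:-1])
--     return {p: [t for t in tests if prefix(t) == p]
--             for p in dict.fromkeys(map(prefix, tests))}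
-- ===== Notes on version B (the rewrite author's own statement) =====
-- stated objective: idiomatic
-- what changed: Replaces the incremental append-into-dict loop by computing the ordered distinct prefixes once (dict.fromkeys) and building each shard's list with a filtering comprehension per prefix.
import Mathlib
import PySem

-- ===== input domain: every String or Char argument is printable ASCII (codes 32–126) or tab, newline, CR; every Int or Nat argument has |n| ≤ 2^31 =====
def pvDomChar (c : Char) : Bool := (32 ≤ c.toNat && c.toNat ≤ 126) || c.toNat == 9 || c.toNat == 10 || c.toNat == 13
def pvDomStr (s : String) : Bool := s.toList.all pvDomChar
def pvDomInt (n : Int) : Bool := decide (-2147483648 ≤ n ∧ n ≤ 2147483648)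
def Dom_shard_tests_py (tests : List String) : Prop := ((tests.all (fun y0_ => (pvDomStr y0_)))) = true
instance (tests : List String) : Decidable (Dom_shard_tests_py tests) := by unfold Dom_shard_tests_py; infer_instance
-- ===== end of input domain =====

-- B replaces A's incremental append-into-dict loop by an ordered-dedup of the prefixes
-- plus one filtering pass per prefix (idiomatic dict comprehension); same return value.

-- shard_prefix = '.'.join(test.split('.')[:-1])  (shared pure helper of both ports)
def pvPrefix (test : String) : String :=
  PySem.Str.join "." (((PySem.Str.split? test ".").getD []).dropLast)

-- ===== PORT A =====
def shard_tests_py (tests : List String) : List (String × List String) :=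
  (tests.foldl
    (fun shards test =>
      let shard_prefix := pvPrefix test
      let shards := if shards.contains shard_prefix = false
                    then shards.insert shard_prefix [] else shards
      shards.modify shard_prefix [] (fun l => l ++ [test]))
    PySem.Dict.empty).items

-- ===== PORT B =====
def shard_tests_py_alt (tests : List String) : List (String × List String) :=
  (PySem.List.dedup (tests.map pvPrefix)).map
    (fun p => (p, tests.filter (fun t => pvPrefix t == p)))

-- ===== PRECONDITION & SPEC =====
def Spec_shard_tests_py (tests : List String) (out : List (String × List String)) : Prop := out = shard_tests_py_alt tests
instance (tests : List String) (out : List (String × List String)) : Decidable (Spec_shard_tests_py tests out) := by unfold Spec_shard_tests_py; infer_instance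

-- ===== CLAIM (what is proved, stated in full; the proofs are below) =====
def Claim_equal_shard_tests_py : Prop := ∀ (tests : List String), Dom_shard_tests_py tests → Spec_shard_tests_py tests (shard_tests_py tests)

-- ===== LEMMAS AND PROOFS =====

-- A's loop body ('if absent, insert []; then append') is exactly Dict.modify with default [].
theorem pv_step_eq (d : PySem.Dict String (List String)) (t : String) :
    (let shards := if d.contains (pvPrefix t) = false
                   then d.insert (pvPrefix t) [] else d
     shards.modify (pvPrefix t) [] (fun l => l ++ [t]))
    = d.modify (pvPrefix t) [] (fun l => l ++ [t]) := by
  by_cases h : d.contains (pvPrefix t) = false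
  · simp only [h, if_pos]
    show (d.insert (pvPrefix t) []).insert (pvPrefix t)
          (((d.insert (pvPrefix t) []).getD (pvPrefix t) []) ++ [t])
        = d.insert (pvPrefix t) ((d.getD (pvPrefix t) []) ++ [t])
    rw [PySem.Dict.getD_insert_self, PySem.Dict.insert_insert_self,
        PySem.Dict.getD_of_not_contains _ _ h]
  · simp only [Bool.not_eq_false] at h
    simp [h]

-- a Nodup-keyed dict is determined by its keys and getD
theorem pv_items_eq_keys_map (d : PySem.Dict String (List String)) (h : d.keys.Nodup) :
    d.items = d.keys.map (fun k => (k, d.getD k [])) := by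
  show d.items = (d.items.map Prod.fst).map (fun k => (k, d.getD k []))
  rw [List.map_map]
  have hcongr : ∀ p ∈ d.items, ((fun k => (k, d.getD k [])) ∘ Prod.fst) p = id p := by
    intro p hp
    have hv : d.getD p.1 [] = p.2 :=
      PySem.Dict.getD_of_mem_items d (k := p.1) (v := p.2) (by simpa using hp) h []
    simp [Function.comp, hv]
  exact ((List.map_congr_left hcongr).trans (List.map_id _)).symm

theorem shard_tests_py_eq_alt (tests : List String) :
    shard_tests_py tests = shard_tests_py_alt tests := by
  unfold shard_tests_py shard_tests_py_alt
  have hfun : (fun (shards : PySem.Dict String (List String)) (test : String) =>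
      let shard_prefix := pvPrefix test
      let shards := if shards.contains shard_prefix = false
                    then shards.insert shard_prefix [] else shards
      shards.modify shard_prefix [] (fun l => l ++ [test]))
      = fun shards test => shards.modify (pvPrefix test) [] (fun l => l ++ [test]) :=
    funext fun d => funext fun t => pv_step_eq d t
  rw [hfun]
  set D := tests.foldl (fun d t => d.modify (pvPrefix t) [] (fun l => l ++ [t]))
      PySem.Dict.empty with hD
  have hkeys : D.keys = PySem.Set.ofList (tests.map pvPrefix) := by
    rw [hD, PySem.Dict.keys_foldl_modify_key tests pvPrefix []
      (fun d x => fun l => l ++ [x]) PySem.Dict.empty]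
    rfl
  have hnodup : D.keys.Nodup := by
    rw [hD]
    exact PySem.Dict.nodup_keys_foldl_modify_key tests pvPrefix []
      (fun d x => fun l => l ++ [x]) PySem.Dict.empty PySem.Dict.nodup_keys_empty
  have hgetD : ∀ c, D.getD c [] = tests.filter (fun t => pvPrefix t == c) := by
    intro c
    have hmap : D = (tests.map (fun t => (pvPrefix t, t))).foldl
        (fun d p => d.modify p.1 [] (fun l => l ++ [p.2])) PySem.Dict.empty := by
      rw [hD, List.foldl_map]
    rw [hmap, PySem.Dict.getD_foldl_modify_append]
    simp [List.filter_map]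
    exact (List.map_id _).symm ▸ List.map_congr_left (fun t ht => rfl) |>.trans (List.map_id _)
  rw [pv_items_eq_keys_map D hnodup, hkeys, PySem.List.dedup_eq_ofList]
  exact List.map_congr_left fun p _ => by rw [hgetD p]

-- ===== VERDICT (by name: the statement is the Claim_ definition above) =====
theorem shard_tests_py_spec : Claim_equal_shard_tests_py := by
  intro tests _
  unfold Spec_shard_tests_py
  exact shard_tests_py_eq_alt tests
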